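-- pv_equiv track=rewrite | github.com/danpro3/advent-of-code | 2024/25_locks_and_keys.py | group_to_seq
-- ===== SOURCE A (Python) =====
-- def group_to_seq(group):
--     seq = []
--     for c in range(len(group[0])):
--         count = -1
--         for r in range(len(group)):
--             if group[r][c] == '#':
--                 count += 1
--         seq.append(count)
--     return seq
-- ===== SOURCE B (Python) =====
-- def group_to_seq(group):
--     counts = [-1] * len(group[0])
--     for row in group:
--         counts = [cnt + 1 if row[c] == '#' else cnt for c, cnt in enumerate(counts)]
--     return counts
-- ===== Notes on version B (the rewrite author's own statement) =====
-- stated objective: alternative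
-- what changed: Replaces the column-major double loop (one independent pass over all rows per column) with a single row-major sweep that maintains all columns' partial counts in one vector updated per row.
import Mathlib
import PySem

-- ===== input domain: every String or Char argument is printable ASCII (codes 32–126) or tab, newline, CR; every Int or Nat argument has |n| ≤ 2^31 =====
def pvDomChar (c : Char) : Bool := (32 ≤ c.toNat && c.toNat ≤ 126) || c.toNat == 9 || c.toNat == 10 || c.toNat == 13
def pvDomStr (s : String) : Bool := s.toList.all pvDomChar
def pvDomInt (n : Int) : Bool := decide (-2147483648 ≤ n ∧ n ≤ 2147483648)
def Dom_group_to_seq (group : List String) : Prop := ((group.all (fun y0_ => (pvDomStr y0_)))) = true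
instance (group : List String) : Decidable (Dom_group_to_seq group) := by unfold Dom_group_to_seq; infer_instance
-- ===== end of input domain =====

-- B replaces A's column-major double loop by a single row-major sweep maintaining all columns'
-- partial counts at once (alternative decomposition, same cost).

-- ===== PORT A =====
-- column-major: for each column c, an independent pass over all rows
def group_to_seq (group : List String) : List Int :=
  (PySem.List.pyRange 0 (PySem.Str.len ((PySem.List.pyGet? group 0).getD "")) 1).foldl
    (fun seq c =>
      seq ++ [(PySem.List.pyRange 0 (group.length : Int) 1).foldl
        (fun count r =>
          if (PySem.Str.pyGet? (PySem.List.pyGetD group r "") c).getD ' ' = '#' then count + 1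
          else count)
        (-1)])
    []

-- ===== PORT B =====
-- row-major: one vector of per-column counts, updated once per row
def group_to_seq_alt (group : List String) : List Int :=
  group.foldl
    (fun counts row =>
      (PySem.List.enumerate counts 0).map
        (fun p => if (PySem.Str.pyGet? row p.1).getD ' ' = '#' then p.2 + 1 else p.2))
    (List.replicate (PySem.Str.len ((PySem.List.pyGet? group 0).getD "")).toNat (-1))

-- ===== PRECONDITION & SPEC =====
-- Pre_ excludes exactly the inputs on which Python A raises IndexError: the empty list
-- (group[0]) and groups with a row shorter than the first row (group[r][c]).
def Pre_group_to_seq (group : List String) : Prop :=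
  group ≠ [] ∧ ∀ s ∈ group, (group.headD "").toList.length ≤ s.toList.length
instance (group : List String) : Decidable (Pre_group_to_seq group) := by
  unfold Pre_group_to_seq; infer_instance

def pvWitness_group_to_seq : List String := ["#.#", ".##", "###"]

def Spec_group_to_seq (group : List String) (out : List Int) : Prop := out = group_to_seq_alt group
instance (group : List String) (out : List Int) : Decidable (Spec_group_to_seq group out) := by
  unfold Spec_group_to_seq; infer_instance

-- ===== CLAIM (what is proved, stated in full; the proofs are below) =====
def Claim_equal_group_to_seq : Prop := ∀ (group : List String), Dom_group_to_seq group → Pre_group_to_seq group → Spec_group_to_seq group (group_to_seq group)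

-- ===== LEMMAS AND PROOFS =====

-- the character A and B both test at row `row`, column `c`
def pvCh (row : String) (c : Int) : Char := (PySem.Str.pyGet? row c).getD ' '

-- A's inner loop over the rows, for one column
lemma pvA_inner (group : List String) (c : Int) :
    (PySem.List.pyRange 0 (group.length : Int) 1).foldl
      (fun count r =>
        if (PySem.Str.pyGet? (PySem.List.pyGetD group r "") c).getD ' ' = '#' then count + 1
        else count) (-1)
    = -1 + (group.countP (fun row => pvCh row c = '#') : Int) := by
  rw [show ((group.length : Int)) = PySem.List.len group by simp [PySem.List.len_eq]]
  rw [PySem.List.foldl_pyRange_zero_pyGetD group ""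
      (fun count row => if (PySem.Str.pyGet? row c).getD ' ' = '#' then count + 1 else count) (-1)]
  simp only [pvCh]
  simpa using PySem.List.foldl_count_if
    (fun row => decide ((PySem.Str.pyGet? row c).getD ' ' = '#')) group (-1)

-- one step of B on a counts vector presented as a map over the column range
lemma pvB_step (W : Int) (f : Int → Int) (row : String) :
    (PySem.List.enumerate ((PySem.List.pyRange 0 W 1).map f) 0).map
        (fun p => if (PySem.Str.pyGet? row p.1).getD ' ' = '#' then p.2 + 1 else p.2)
    = (PySem.List.pyRange 0 W 1).map (fun j => if pvCh row j = '#' then f j + 1 else f j) := by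
  rw [PySem.List.enumerate_eq_map_pyRange _ 0]
  rw [List.map_map]
  rcases le_or_gt W 0 with h | h
  · simp [PySem.List.pyRange_one_eq_nil h]
  · have hlen : PySem.List.len ((PySem.List.pyRange 0 W 1).map f) = W := by
      simp [PySem.List.len_eq, PySem.List.length_pyRange_one]
      omega
    rw [hlen]
    refine List.map_congr_left ?_
    intro j hj
    have hj' := (PySem.List.mem_pyRange_one).1 hj
    simp only [Function.comp]
    rw [PySem.List.pyGetD_map_pyRange_of_nonneg f W j 0 hj'.1 hj'.2]
    rfl

-- B's whole fold, by induction over the rows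
lemma pvB_fold (W : Int) :
    ∀ (group : List String) (f : Int → Int),
      group.foldl
        (fun counts row =>
          (PySem.List.enumerate counts 0).map
            (fun p => if (PySem.Str.pyGet? row p.1).getD ' ' = '#' then p.2 + 1 else p.2))
        ((PySem.List.pyRange 0 W 1).map f)
      = (PySem.List.pyRange 0 W 1).map
          (fun j => f j + (group.countP (fun row => pvCh row j = '#') : Int)) := by
  intro group
  induction group with
  | nil => intro f; simp
  | cons row rest ih =>
    intro f
    rw [List.foldl_cons, pvB_step W f row, ih]
    refine List.map_congr_left ?_
    intro j _
    simp only [List.countP_cons]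
    by_cases h : pvCh row j = '#'
    · simp [h]; ring
    · simp [h]

-- the initial vector of B is a constant map over the column range
lemma pvB_init (w : Nat) :
    List.replicate w (-1 : Int) = (PySem.List.pyRange 0 (w : Int) 1).map (fun _ => (-1 : Int)) := by
  rw [List.map_const']
  congr 1
  simp [PySem.List.length_pyRange_one]

theorem group_to_seq_spec : Claim_equal_group_to_seq := by
  intro group _ hpre
  rcases hpre with ⟨hne, _⟩
  unfold Spec_group_to_seq group_to_seq group_to_seq_alt
  rcases group with _ | ⟨s, rest⟩
  · exact absurd rfl hne
  have h0 : (PySem.List.pyGet? (s :: rest) 0).getD "" = s := by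
    rw [PySem.List.pyGet?_zero_cons]; rfl
  rw [h0]
  have hlen : PySem.Str.len s = (s.toList.length : Int) := by simp [PySem.Str.len_eq]
  rw [hlen, Int.toNat_natCast, pvB_init, pvB_fold]
  rw [PySem.List.foldl_append_singleton_eq_map]
  refine List.map_congr_left ?_
  intro c _
  rw [pvA_inner]
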